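-- pv_equiv track=rewrite | github.com/xy96713-jpg/11 | core/rekordbox_phrase_reader.py | find_phrase
-- ===== SOURCE A (Python) =====
-- from typing import Optional, List, Dict, Any
--
-- def find_phrase(phrases: List[Dict], kinds: List[str], position: str = "first") -> Optional[Dict]:
--     """
--     在段落列表中查找特定类型的段落
--
--     Args:
--         phrases: 段落列表
--         kinds: 要查找的段落类型列表（如 ["Intro", "Up"]）
--         position: "first" 或 "last"
--
--     Returns:
--         找到的段落，未找到则返回 None
--     """
--     matching = [p for p in phrases if p["kind"] in kinds]
--
--     if not matching:
--         return None
--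
--     if position == "first":
--         return matching[0]
--     elif position == "last":
--         return matching[-1]
--
--     return matching[0]
-- ===== SOURCE B (Python) =====
-- from typing import Optional, List, Dict
--
-- def find_phrase(phrases: List[Dict], kinds: List[str], position: str = "first") -> Optional[Dict]:
--     """Single early-exit scan: backwards for 'last', forwards otherwise."""
--     kset = set(kinds)
--     it = reversed(phrases) if position == "last" else phrases
--     for p in it:
--         if p["kind"] in kset:
--             return p
--     return None
-- ===== Notes on version B (the rewrite author's own statement) =====
-- stated objective: idiomatic
-- what changed: Replaces building the full filtered list and indexing it (0 / -1) by a single early-exit scan, run backwards over reversed(phrases) when position == 'last' and forwards otherwise, with a set for kind membership.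
import Mathlib
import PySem

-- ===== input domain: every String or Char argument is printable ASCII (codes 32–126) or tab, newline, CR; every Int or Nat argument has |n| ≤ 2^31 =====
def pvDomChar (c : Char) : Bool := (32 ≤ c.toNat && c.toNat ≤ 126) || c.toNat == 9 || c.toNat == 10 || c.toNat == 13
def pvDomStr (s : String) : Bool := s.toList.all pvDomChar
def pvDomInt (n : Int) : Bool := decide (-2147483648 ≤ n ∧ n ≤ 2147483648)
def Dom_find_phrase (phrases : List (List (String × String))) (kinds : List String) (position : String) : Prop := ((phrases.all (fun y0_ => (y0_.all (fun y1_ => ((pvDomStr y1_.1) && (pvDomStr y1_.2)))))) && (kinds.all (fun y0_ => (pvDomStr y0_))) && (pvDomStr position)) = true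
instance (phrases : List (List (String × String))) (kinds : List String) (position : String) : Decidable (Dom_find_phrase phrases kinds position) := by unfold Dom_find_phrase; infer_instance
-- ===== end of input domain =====

-- B replaces the build-then-index approach by a single early-exit scan (backwards for "last"); objective: idiomatic.

-- ===== PORT A =====
-- p["kind"] raises KeyError when absent; Pre_ guarantees the key, so getD "" is exact there.
def find_phrase (phrases : List (List (String × String))) (kinds : List String) (position : String) : Option (List (String × String)) :=
  let matching := phrases.filter (fun p => kinds.contains (((PySem.Dict.mk p).get? "kind").getD ""))
  if matching.isEmpty then none
  else if position = "first" then matching.head?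
  else if position = "last" then PySem.List.pyGet? matching (-1)
  else matching.head?

-- ===== PORT B =====
def find_phrase_alt (phrases : List (List (String × String))) (kinds : List String) (position : String) : Option (List (String × String)) :=
  let kset : PySem.Set String := PySem.Set.ofList kinds
  let it := if position = "last" then phrases.reverse else phrases
  it.find? (fun p => PySem.Set.contains kset (((PySem.Dict.mk p).get? "kind").getD ""))

-- ===== PRECONDITION & SPEC =====
-- Pre_ excludes inputs on which A raises KeyError: a phrase dict without a "kind" key.
def Pre_find_phrase (phrases : List (List (String × String))) (kinds : List String) (position : String) : Prop :=
  ∀ p ∈ phrases, ((PySem.Dict.mk p).get? "kind").isSome = true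
instance (phrases : List (List (String × String))) (kinds : List String) (position : String) : Decidable (Pre_find_phrase phrases kinds position) := by unfold Pre_find_phrase; infer_instance
def pvWitness_find_phrase : (List (List (String × String))) × List String × String :=
  ([[("kind", "Intro"), ("len", "8")], [("kind", "Up")]], ["Up", "Chorus"], "last")

def Spec_find_phrase (phrases : List (List (String × String))) (kinds : List String) (position : String) (out : Option (List (String × String))) : Prop := out = find_phrase_alt phrases kinds position
instance (phrases : List (List (String × String))) (kinds : List String) (position : String) (out : Option (List (String × String))) : Decidable (Spec_find_phrase phrases kinds position out) := by unfold Spec_find_phrase; infer_instance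

-- ===== CLAIM (what is proved, stated in full; the proofs are below) =====
def Claim_equal_find_phrase : Prop := ∀ (phrases : List (List (String × String))) (kinds : List String) (position : String), Dom_find_phrase phrases kinds position → Pre_find_phrase phrases kinds position → Spec_find_phrase phrases kinds position (find_phrase phrases kinds position)

-- ===== LEMMAS AND PROOFS =====

theorem pv_head?_filter {α : Type} (p : α → Bool) (l : List α) :
    (l.filter p).head? = l.find? p := by
  induction l with
  | nil => rfl
  | cons a l ih => by_cases h : p a <;> simp [h, ih]

theorem pv_contains_ofList (kinds : List String) (x : String) :
    PySem.Set.contains (PySem.Set.ofList kinds) x = kinds.contains x := by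
  rw [Bool.eq_iff_iff]
  simp [PySem.Set.mem_ofList]

theorem pv_filter_eq_nil_find? {α : Type} (p : α → Bool) (l : List α)
    (h : l.filter p = []) : l.find? p = none := by
  rw [← pv_head?_filter, h]; rfl

-- ===== VERDICT (by name: the statement is the Claim_ definition above) =====
theorem find_phrase_spec : Claim_equal_find_phrase := by
  intro phrases kinds position _ _
  unfold Spec_find_phrase find_phrase find_phrase_alt
  simp only [pv_contains_ofList]
  set p : List (String × String) → Bool :=
    fun q => kinds.contains (((PySem.Dict.mk q).get? "kind").getD "") with hp
  by_cases hlast : position = "last"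
  · subst hlast
    simp only [if_pos rfl]
    by_cases hm : phrases.filter p = []
    · have h2 : phrases.reverse.filter p = [] := by
        rw [List.filter_reverse, hm, List.reverse_nil]
      simp [hm, pv_filter_eq_nil_find? p phrases.reverse h2]
    · rw [if_neg (by simp [List.isEmpty_iff, hm]), if_neg (by decide), if_pos trivial, if_pos trivial,
          PySem.List.pyGet?_neg_one, List.getLast?_eq_head?_reverse,
          ← List.filter_reverse, pv_head?_filter]
  · simp only [if_neg hlast]
    by_cases hm : phrases.filter p = []
    · simp [List.isEmpty_iff, hm, pv_filter_eq_nil_find? p phrases hm]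
    · by_cases hfirst : position = "first" <;>
        simp [List.isEmpty_iff, hm, hfirst, hlast, pv_head?_filter]
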